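-- pv_equiv track=rewrite | github.com/suriya911/BiteBuddy-Food-Recipe-Agent | backend/scripts/build_qdrant_embeddings.py | parse_r_c_vector
-- ===== SOURCE A (Python) =====
-- def parse_r_c_vector(value: str) -> list[str]:
--     inner = value.strip()
--     if inner.startswith("c(") and inner.endswith(")"):
--         inner = inner[2:-1]
--     items: list[str] = []
--     current = ""
--     in_quotes = False
--     for char in inner:
--         if char == '"':
--             in_quotes = not in_quotes
--             continue
--         if char == "," and not in_quotes:
--             if current.strip():
--                 items.append(current.strip())
--             current = ""
--             continue
--         current += char
--     if current.strip():
--         items.append(current.strip())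
--     return [item for item in (token.strip() for token in items) if item]
-- ===== SOURCE B (Python) =====
-- def parse_r_c_vector(value: str) -> list[str]:
--     inner = value.strip()
--     if inner.startswith("c(") and inner.endswith(")"):
--         inner = inner[2:-1]
--     # pass 1: indices of separator commas (commas outside quotes)
--     seps = []
--     quoted = False
--     for i, ch in enumerate(inner):
--         if ch == '"':
--             quoted = not quoted
--         elif ch == "," and not quoted:
--             seps.append(i)
--     # pass 2: slice into raw segments at the separators
--     segments = []
--     start = 0
--     for i in seps:
--         segments.append(inner[start:i])
--         start = i + 1
--     segments.append(inner[start:])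
--     # pass 3: clean each segment
--     out = []
--     for seg in segments:
--         item = seg.replace('"', '').strip()
--         if item:
--             out.append(item)
--     return out
-- ===== Notes on version B (the rewrite author's own statement) =====
-- stated objective: alternative
-- what changed: A accumulates items in a single character loop (toggling a quote flag, skipping quote chars, flushing the stripped accumulator at top-level commas); B instead first collects the indices of separator commas by quote parity, then slices the string into raw segments at those indices, then cleans each segment by deleting quote characters and stripping whitespace.
import Mathlib
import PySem

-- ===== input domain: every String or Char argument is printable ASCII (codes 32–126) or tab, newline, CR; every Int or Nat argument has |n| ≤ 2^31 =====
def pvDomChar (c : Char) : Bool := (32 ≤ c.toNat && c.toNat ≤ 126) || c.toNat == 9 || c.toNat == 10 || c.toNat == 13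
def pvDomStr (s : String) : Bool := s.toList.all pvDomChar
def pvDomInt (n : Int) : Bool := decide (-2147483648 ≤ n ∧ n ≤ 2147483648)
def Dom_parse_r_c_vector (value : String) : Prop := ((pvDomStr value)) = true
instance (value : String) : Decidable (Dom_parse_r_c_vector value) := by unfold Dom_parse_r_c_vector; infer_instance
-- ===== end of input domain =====

-- B replaces A's single accumulate-as-you-go loop by a locate-separators / slice-into-segments / clean-each-segment decomposition (objective: alternative, same cost).

-- ===== PORT A =====
def parse_r_c_vector (value : String) : List String :=
  let inner0 := PySem.Chars.strip value.toList
  let inner := if PySem.Chars.startswith inner0 "c(".toList && PySem.Chars.endswith inner0 ")".toList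
               then PySem.List.slice inner0 (some 2) (some (-1)) else inner0
  let st := inner.foldl
    (fun (s : List (List Char) × List Char × Bool) char =>
      if char == '"' then (s.1, s.2.1, !s.2.2)
      else if char == ',' && !s.2.2 then
        (if PySem.Chars.strip s.2.1 ≠ [] then s.1 ++ [PySem.Chars.strip s.2.1] else s.1, [], s.2.2)
      else (s.1, s.2.1 ++ [char], s.2.2))
    ([], [], false)
  let items := if PySem.Chars.strip st.2.1 ≠ [] then st.1 ++ [PySem.Chars.strip st.2.1] else st.1
  ((items.map (fun t => PySem.Chars.strip t)).filter (fun i => i ≠ [])).map (fun l => String.ofList l)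

-- ===== PORT B =====
def parse_r_c_vector_alt (value : String) : List String :=
  let inner0 := PySem.Chars.strip value.toList
  let inner := if PySem.Chars.startswith inner0 "c(".toList && PySem.Chars.endswith inner0 ")".toList
               then PySem.List.slice inner0 (some 2) (some (-1)) else inner0
  -- pass 1: indices of separator commas (commas outside quotes)
  let sp := (PySem.List.enumerate inner).foldl
    (fun (s : List Int × Bool) p =>
      if p.2 == '"' then (s.1, !s.2)
      else if p.2 == ',' && !s.2 then (s.1 ++ [p.1], s.2)
      else s)
    ([], false)
  -- pass 2: slice into raw segments at the separators
  let st := sp.1.foldl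
    (fun (s : List (List Char) × Int) i => (s.1 ++ [PySem.List.slice inner (some s.2) (some i)], i + 1))
    ([], 0)
  let segments := st.1 ++ [PySem.List.slice inner (some st.2) none]
  -- pass 3: clean each segment
  segments.foldl
    (fun out seg =>
      let item := PySem.Chars.strip (PySem.Chars.replace seg "\"".toList "".toList)
      if item ≠ [] then out ++ [String.ofList item] else out)
    []

-- ===== PRECONDITION & SPEC =====
def Spec_parse_r_c_vector (value : String) (out : List String) : Prop := out = parse_r_c_vector_alt value
instance (value : String) (out : List String) : Decidable (Spec_parse_r_c_vector value out) := by unfold Spec_parse_r_c_vector; infer_instance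

-- ===== CLAIM (what is proved, stated in full; the proofs are below) =====
def Claim_equal_parse_r_c_vector : Prop := ∀ (value : String), Dom_parse_r_c_vector value → Spec_parse_r_c_vector value (parse_r_c_vector value)

-- ===== LEMMAS AND PROOFS =====

-- remove every '"' (what A's skipped quote chars / B's str.replace amount to)
def pvDequote (l : List Char) : List Char := l.filter (fun c => c ≠ '"')

-- split at top-level commas (quotes kept in the segments): (first segment, remaining segments)
def pvSegs : List Char → Bool → List Char × List (List Char)
  | [], _ => ([], [])
  | c :: t, q =>
    if c = '"' then ('"' :: (pvSegs t (!q)).1, (pvSegs t (!q)).2)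
    else if c = ',' ∧ q = false then ([], (pvSegs t q).1 :: (pvSegs t q).2)
    else (c :: (pvSegs t q).1, (pvSegs t q).2)

-- dequote+strip every segment, keep the non-empty results
def pvEmit (segs : List (List Char)) : List (List Char) :=
  (segs.map (fun s => PySem.Chars.strip (pvDequote s))).filter (fun i => i ≠ [])

-- separator-comma indices, offset j, quote flag q
def pvSepIdx : List Char → Bool → Nat → List Nat
  | [], _, _ => []
  | c :: t, q, j =>
    if c = '"' then pvSepIdx t (!q) (j + 1)
    else if c = ',' ∧ q = false then j :: pvSepIdx t q (j + 1)
    else pvSepIdx t q (j + 1)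

def pvQAfter : List Char → Bool → Bool
  | [], q => q
  | c :: t, q => pvQAfter t (if c = '"' then !q else q)

-- slicing L at separator positions, current slice starting at s
def pvSliceSegs (L : List Char) : List Nat → Nat → List (List Char)
  | [], s => [L.drop s]
  | i :: r, s => (L.drop s).take (i - s) :: pvSliceSegs L r (i + 1)

def pvAStep (s : List (List Char) × List Char × Bool) (char : Char) : List (List Char) × List Char × Bool :=
  if char == '"' then (s.1, s.2.1, !s.2.2)
  else if char == ',' && !s.2.2 then
    (if PySem.Chars.strip s.2.1 ≠ [] then s.1 ++ [PySem.Chars.strip s.2.1] else s.1, [], s.2.2)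
  else (s.1, s.2.1 ++ [char], s.2.2)

def pvSepStep (s : List Int × Bool) (p : Int × Char) : List Int × Bool :=
  if p.2 == '"' then (s.1, !s.2)
  else if p.2 == ',' && !s.2 then (s.1 ++ [p.1], s.2)
  else s

-- ---- generic list facts ----

theorem pv_dw_idem {α} (p : α → Bool) (l : List α) :
    List.dropWhile p (List.dropWhile p l) = List.dropWhile p l := by
  rw [List.dropWhile_eq_self_iff]
  intro hl hp
  have h := List.head_dropWhile_not p (l := l) (by intro h; simp [h] at hl)
  simp only [List.head_eq_getElem] at h
  simp [hp] at h

theorem pv_strip_idem (s : List Char) : PySem.Chars.strip (PySem.Chars.strip s) = PySem.Chars.strip s := by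
  simp only [PySem.Chars.strip, PySem.Chars.lstrip, PySem.Chars.rstrip]
  set p := PySem.Chars.isspace
  set a := List.dropWhile p s with ha
  set b := (List.dropWhile p a.reverse).reverse with hb
  have hba : b <+: a := by
    rw [hb]
    rcases List.dropWhile_suffix (l := a.reverse) p with ⟨u, hu⟩
    exact ⟨u.reverse, by rw [← List.reverse_append, hu, List.reverse_reverse]⟩
  have h1 : List.dropWhile p b = b := by
    rw [List.dropWhile_eq_self_iff]
    intro hl hp
    have hbne : b ≠ [] := by intro h; simp [h] at hl
    have hane : a ≠ [] := by intro h; rw [h] at hba; simp [List.prefix_nil] at hba; exact hbne hba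
    have hh : b.head hbne = a.head hane := hba.head hbne
    have hane' : List.dropWhile p s ≠ [] := by rw [← ha]; exact hane
    have h2 : p (a.head hane) = false := List.head_dropWhile_not p hane'
    rw [List.head_eq_getElem] at hh
    rw [hh] at hp
    rw [hp] at h2
    exact absurd h2 (by simp)
  rw [h1, List.reverse_reverse, pv_dw_idem]

theorem pv_dequote_of_not_mem {a : List Char} (h : '"' ∉ a) : pvDequote a = a := by
  simp [pvDequote]; exact fun c hc hq => h (hq ▸ hc)

-- ---- B's str.replace('"', '') is pvDequote ----

theorem pv_go_quote (fuel : Nat) (l acc : List Char) (h : l.length ≤ fuel) :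
    PySem.Chars.replace.go ['"'] [] fuel l acc = acc.reverse ++ pvDequote l := by
  induction fuel generalizing l acc with
  | zero =>
    cases l with
    | nil => simp [PySem.Chars.replace.go, pvDequote]
    | cons c t => simp at h
  | succ n ih =>
    cases l with
    | nil => simp [PySem.Chars.replace.go, pvDequote]
    | cons c t =>
      rw [PySem.Chars.replace.go]
      simp only [List.isPrefixOf, Bool.and_true]
      by_cases hc : c = '"'
      · subst hc
        simp only [BEq.rfl, if_true]
        show PySem.Chars.replace.go ['"'] [] n t acc = _
        rw [ih t acc (by simp at h; omega)]
        simp [pvDequote]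
      · have hbc : ('"' == c) = false := beq_eq_false_iff_ne.mpr (fun hh => hc hh.symm)
        rw [hbc]
        simp only [Bool.false_eq_true, if_false]
        rw [ih t (c :: acc) (by simp at h; omega)]
        simp [pvDequote, hc]

theorem pv_replace_quote (s : List Char) :
    PySem.Chars.replace s "\"".toList "".toList = pvDequote s := by
  have hq : "\"".toList = ['"'] := rfl
  have he : "".toList = ([] : List Char) := rfl
  rw [hq, he, PySem.Chars.replace]
  simp only [show (['"'] : List Char).isEmpty = false from rfl]
  simp only [Bool.false_eq_true, if_false]
  exact pv_go_quote _ _ _ le_rfl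

-- ---- A's loop invariant ----

theorem pv_A_loop (l : List Char) (items : List (List Char)) (cur : List Char) (q : Bool)
    (h : '"' ∉ cur) :
    (fun st => if PySem.Chars.strip st.2.1 ≠ [] then st.1 ++ [PySem.Chars.strip st.2.1] else st.1)
      (l.foldl pvAStep (items, cur, q))
    = items ++ pvEmit ((cur ++ (pvSegs l q).1) :: (pvSegs l q).2) := by
  induction l generalizing items cur q with
  | nil =>
    simp only [List.foldl_nil, pvSegs, List.append_nil, pvEmit, List.map_cons, List.map_nil,
      List.filter, pv_dequote_of_not_mem h]
    by_cases hs : PySem.Chars.strip cur = [] <;> simp [hs]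
  | cons c t ih =>
    by_cases hc : c = '"'
    · subst hc
      have step : pvAStep (items, cur, q) '"' = (items, cur, !q) := by simp [pvAStep]
      rw [List.foldl_cons, step, ih items cur (!q) h]
      have hseg : pvSegs ('"' :: t) q = ('"' :: (pvSegs t (!q)).1, (pvSegs t (!q)).2) := by
        rw [pvSegs]; simp
      rw [hseg]
      simp [pvEmit, pvDequote]
    · by_cases hcm : c = ',' ∧ q = false
      · obtain ⟨hc1, hq⟩ := hcm; subst hc1; subst hq
        have step : pvAStep (items, cur, false) ',' =
            (if PySem.Chars.strip cur ≠ [] then items ++ [PySem.Chars.strip cur] else items, [], false) := by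
          simp [pvAStep]
        have hseg : pvSegs (',' :: t) false = ([], (pvSegs t false).1 :: (pvSegs t false).2) := by
          rw [pvSegs]; rw [if_neg (by decide), if_pos ⟨rfl, rfl⟩]
        rw [List.foldl_cons, step, ih _ [] false (by simp), hseg]
        simp only [List.nil_append, List.append_nil, pvEmit, List.map_cons, List.filter_cons]
        rw [pv_dequote_of_not_mem h]
        by_cases hs : PySem.Chars.strip cur = [] <;> simp [hs]
      · have step : pvAStep (items, cur, q) c = (items, cur ++ [c], q) := by
          simp only [pvAStep]
          rw [if_neg (by simp [hc]), if_neg (by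
            intro hx
            simp only [Bool.and_eq_true, beq_iff_eq, Bool.not_eq_true'] at hx
            exact hcm ⟨hx.1, hx.2⟩)]
        have hseg : pvSegs (c :: t) q = (c :: (pvSegs t q).1, (pvSegs t q).2) := by
          rw [pvSegs]; rw [if_neg hc, if_neg hcm]
        rw [List.foldl_cons, step, ih items (cur ++ [c]) q (by simp [h]; exact fun hh => hc hh.symm), hseg]
        simp [pvEmit]

-- ---- B pass 1 computes pvSepIdx ----

theorem pv_sep_fold (l : List Char) (q : Bool) (acc : List Int) (j : Nat) :
    (PySem.List.enumerate l (j : Int)).foldl pvSepStep (acc, q)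
      = (acc ++ (pvSepIdx l q j).map (fun (n : Nat) => (n : Int)), pvQAfter l q) := by
  induction l generalizing q acc j with
  | nil => simp [PySem.List.enumerate, pvSepIdx, pvQAfter]
  | cons c t ih =>
    rw [PySem.List.enumerate_cons, List.foldl_cons]
    have hj : ((j : Int) + 1) = ((j + 1 : Nat) : Int) := by push_cast; ring
    by_cases hc : c = '"'
    · subst hc
      have : pvSepStep (acc, q) ((j : Int), '"') = (acc, !q) := by simp [pvSepStep]
      rw [this, hj, ih]
      simp [pvSepIdx, pvQAfter]
    · by_cases hcm : c = ',' ∧ q = false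
      · obtain ⟨h1, h2⟩ := hcm; subst h1; subst h2
        have : pvSepStep (acc, false) ((j : Int), ',') = (acc ++ [(j : Int)], false) := by
          simp [pvSepStep]
        rw [this, hj, ih]
        simp [pvSepIdx, pvQAfter]
      · have : pvSepStep (acc, q) ((j : Int), c) = (acc, q) := by
          simp only [pvSepStep]
          rw [if_neg (by simp [hc]), if_neg (by
            intro hx
            simp only [Bool.and_eq_true, beq_iff_eq, Bool.not_eq_true'] at hx
            exact hcm ⟨hx.1, hx.2⟩)]
        rw [this, hj, ih]
        have hseg : pvSepIdx (c :: t) q j = pvSepIdx t q (j + 1) := by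
          rw [pvSepIdx]; rw [if_neg hc, if_neg hcm]
        have hqa : pvQAfter (c :: t) q = pvQAfter t q := by
          rw [pvQAfter]; rw [if_neg hc]
        rw [hseg, hqa]

-- ---- B pass 2 computes pvSliceSegs ----

theorem pv_slice_fold (L : List Char) (seps : List Nat) (segs : List (List Char)) (s : Nat) :
    (fun st => st.1 ++ [PySem.List.slice L (some st.2) none])
      ((seps.map (fun (n : Nat) => (n : Int))).foldl
        (fun (st : List (List Char) × Int) i => (st.1 ++ [PySem.List.slice L (some st.2) (some i)], i + 1))
        (segs, (s : Int)))
    = segs ++ pvSliceSegs L seps s := by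
  induction seps generalizing segs s with
  | nil => simp [pvSliceSegs, PySem.List.slice_from_natCast]
  | cons i r ih =>
    rw [List.map_cons, List.foldl_cons]
    have hi : ((i : Int) + 1) = ((i + 1 : Nat) : Int) := by push_cast; ring
    rw [PySem.List.slice_natCast, hi, ih]
    simp [pvSliceSegs]

theorem pv_sliceSegs_shift (c : Char) (t : List Char) (seps : List Nat) (s : Nat) :
    pvSliceSegs (c :: t) (seps.map (· + 1)) (s + 1) = pvSliceSegs t seps s := by
  induction seps generalizing s with
  | nil => simp [pvSliceSegs]
  | cons i r ih => simp [pvSliceSegs, ih]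

theorem pv_sepIdx_succ (l : List Char) (q : Bool) (j : Nat) :
    pvSepIdx l q (j + 1) = (pvSepIdx l q j).map (· + 1) := by
  induction l generalizing q j with
  | nil => simp [pvSepIdx]
  | cons c t ih =>
    by_cases hc : c = '"'
    · subst hc; simp only [pvSepIdx, if_true]; exact ih (!q) (j + 1)
    · by_cases hcm : c = ',' ∧ q = false
      · obtain ⟨h1, h2⟩ := hcm; subst h1; subst h2
        have e1 : ∀ k : Nat, pvSepIdx (',' :: t) false k = k :: pvSepIdx t false (k + 1) := by
          intro k; rw [pvSepIdx]; rw [if_neg (by decide), if_pos ⟨rfl, rfl⟩]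
        rw [e1, e1, List.map_cons, ih false (j + 1)]
      · simp only [pvSepIdx]
        rw [if_neg hc, if_neg hcm, if_neg hc, if_neg hcm]
        exact ih q (j + 1)

theorem pv_sliceSegs_cons (c : Char) (t : List Char) (sp : List Nat) :
    pvSliceSegs (c :: t) (sp.map (· + 1)) 0
      = (c :: ((pvSliceSegs t sp 0).headI)) :: (pvSliceSegs t sp 0).tail := by
  cases sp with
  | nil => simp [pvSliceSegs]
  | cons i r =>
    simp only [List.map_cons, pvSliceSegs, List.drop_zero, Nat.sub_zero, List.take_succ_cons,
      List.headI, List.tail]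
    rw [pv_sliceSegs_shift]

-- ---- slicing at the separator indices yields exactly the top-level segments ----

theorem pv_main (l : List Char) (q : Bool) :
    pvSliceSegs l (pvSepIdx l q 0) 0 = (pvSegs l q).1 :: (pvSegs l q).2 := by
  induction l generalizing q with
  | nil => simp [pvSliceSegs, pvSepIdx, pvSegs]
  | cons c t ih =>
    by_cases hc : c = '"'
    · subst hc
      have h1 : pvSepIdx ('"' :: t) q 0 = (pvSepIdx t (!q) 0).map (· + 1) := by
        rw [pvSepIdx, if_pos rfl, pv_sepIdx_succ]
      have h2 : pvSegs ('"' :: t) q = ('"' :: (pvSegs t (!q)).1, (pvSegs t (!q)).2) := by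
        rw [pvSegs]; simp
      rw [h1, h2, pv_sliceSegs_cons, ih]
      simp
    · by_cases hcm : c = ',' ∧ q = false
      · obtain ⟨h1, h2⟩ := hcm; subst h1; subst h2
        have h1 : pvSepIdx (',' :: t) false 0 = 0 :: (pvSepIdx t false 0).map (· + 1) := by
          rw [pvSepIdx, if_neg (by decide), if_pos ⟨rfl, rfl⟩, pv_sepIdx_succ]
        have h2 : pvSegs (',' :: t) false = ([], (pvSegs t false).1 :: (pvSegs t false).2) := by
          rw [pvSegs]; rw [if_neg (by decide), if_pos ⟨rfl, rfl⟩]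
        rw [h1, h2]
        have hs := pv_sliceSegs_shift ',' t (pvSepIdx t false 0) 0
        simp only [Nat.zero_add] at hs
        simp only [pvSliceSegs, Nat.zero_add]
        rw [hs, ih]
        simp
      · have h1 : pvSepIdx (c :: t) q 0 = (pvSepIdx t q 0).map (· + 1) := by
          rw [pvSepIdx]; rw [if_neg hc, if_neg hcm, pv_sepIdx_succ]
        have h2 : pvSegs (c :: t) q = (c :: (pvSegs t q).1, (pvSegs t q).2) := by
          rw [pvSegs]; rw [if_neg hc, if_neg hcm]
        rw [h1, h2, pv_sliceSegs_cons, ih]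
        simp

-- ---- B pass 3 ----

theorem pv_out_fold (segs : List (List Char)) (out : List String) :
    segs.foldl
      (fun out seg =>
        let item := PySem.Chars.strip (PySem.Chars.replace seg "\"".toList "".toList)
        if item ≠ [] then out ++ [String.ofList item] else out)
      out
    = out ++ (pvEmit segs).map (fun l => String.ofList l) := by
  induction segs generalizing out with
  | nil => simp [pvEmit]
  | cons s r ih =>
    rw [List.foldl_cons, ih]
    simp only [pv_replace_quote, pvEmit, List.map_cons, List.filter_cons]
    by_cases hs : PySem.Chars.strip (pvDequote s) = [] <;> simp [hs]

-- ---- A's final re-strip + re-filter is a no-op on pvEmit ----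

theorem pv_postclean (segs : List (List Char)) :
    ((pvEmit segs).map (fun t => PySem.Chars.strip t)).filter (fun i => i ≠ []) = pvEmit segs := by
  induction segs with
  | nil => simp [pvEmit]
  | cons s r ih =>
    simp only [pvEmit, List.map_cons, List.filter_cons]
    by_cases hs : PySem.Chars.strip (pvDequote s) = []
    · simpa [hs, pvEmit] using ih
    · simp only [hs, decide_not, decide_false, Bool.not_false, if_true, List.map_cons,
        List.filter_cons, pv_strip_idem, hs]
      simpa [hs, pvEmit, pv_strip_idem] using ih

-- A's post-inner computation
def pvABody (inner : List Char) : List String :=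
  let st := inner.foldl pvAStep ([], [], false)
  let items := if PySem.Chars.strip st.2.1 ≠ [] then st.1 ++ [PySem.Chars.strip st.2.1] else st.1
  ((items.map (fun t => PySem.Chars.strip t)).filter (fun i => i ≠ [])).map (fun l => String.ofList l)

-- B's post-inner computation
def pvBBody (inner : List Char) : List String :=
  let sp := (PySem.List.enumerate inner).foldl pvSepStep ([], false)
  let st := sp.1.foldl
    (fun (s : List (List Char) × Int) i => (s.1 ++ [PySem.List.slice inner (some s.2) (some i)], i + 1))
    ([], 0)
  let segments := st.1 ++ [PySem.List.slice inner (some st.2) none]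
  segments.foldl
    (fun out seg =>
      let item := PySem.Chars.strip (PySem.Chars.replace seg "\"".toList "".toList)
      if item ≠ [] then out ++ [String.ofList item] else out)
    []

theorem pv_core (l : List Char) : pvABody l = pvBBody l := by
  -- A side
  have hA : pvABody l = (pvEmit ((pvSegs l false).1 :: (pvSegs l false).2)).map (fun s => String.ofList s) := by
    unfold pvABody
    dsimp only
    have := pv_A_loop l [] [] false (by simp)
    simp only [List.nil_append] at this
    rw [this, pv_postclean]
  -- B side
  have hB : pvBBody l = (pvEmit ((pvSegs l false).1 :: (pvSegs l false).2)).map (fun s => String.ofList s) := by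
    unfold pvBBody
    dsimp only
    have h0 : (0 : Int) = ((0 : Nat) : Int) := rfl
    rw [h0, pv_sep_fold l false [] 0]
    simp only [List.nil_append]
    have h2 := pv_slice_fold l (pvSepIdx l false 0) [] 0
    simp only [List.nil_append] at h2
    rw [h2, pv_main, pv_out_fold]
    simp
  rw [hA, hB]

theorem parse_r_c_vector_eq (value : String) :
    parse_r_c_vector value = parse_r_c_vector_alt value :=
  pv_core _

-- ===== VERDICT (by name: the statement is the Claim_ definition above) =====
theorem parse_r_c_vector_spec : Claim_equal_parse_r_c_vector := by
  intro value _
  show _ = _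
  exact parse_r_c_vector_eq value
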